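-- pv_equiv track=rewrite | github.com/xxkonn/smart-home-ml-task | src/auc_feature_diagnostic.py | identify_feature_groups
-- ===== SOURCE A (Python) =====
-- from typing import Dict, List, Optional, Tuple, Union
--
-- def identify_feature_groups(feature_aucs: Dict[str, Dict]) -> Dict[str, List[str]]:
--     """
--     Group features by their origin/type.
--
--     Args:
--         feature_aucs: Feature AUC dictionary
--
--     Returns:
--         Dictionary of feature groups
--     """
--     groups = {
--         'time_features': [],
--         'temperature_features': [],
--         'fridge_features': [],
--         'motion_features': [],
--         'door_window_features': [],
--         'cross_sensor_features': [],
--         'original_features': []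
--     }
--
--     for feature in feature_aucs.keys():
--         if any(x in feature.lower() for x in ['hour', 'day', 'month', 'weekend', 'night', 'business', 'peak']):
--             groups['time_features'].append(feature)
--         elif 'temp' in feature.lower():
--             groups['temperature_features'].append(feature)
--         elif 'fridge' in feature.lower():
--             groups['fridge_features'].append(feature)
--         elif 'motion' in feature.lower():
--             groups['motion_features'].append(feature)
--         elif any(x in feature.lower() for x in ['door', 'window']):
--             groups['door_window_features'].append(feature)
--         elif any(x in feature.lower() for x in ['interaction', 'with', 'and', 'ratio']):
--             groups['cross_sensor_features'].append(feature)
--         else: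
--             groups['original_features'].append(feature)
--
--     return groups
-- ===== SOURCE B (Python) =====
-- def identify_feature_groups(feature_aucs):
--     rules = [
--         ('time_features', ['hour', 'day', 'month', 'weekend', 'night', 'business', 'peak']),
--         ('temperature_features', ['temp']),
--         ('fridge_features', ['fridge']),
--         ('motion_features', ['motion']),
--         ('door_window_features', ['door', 'window']),
--         ('cross_sensor_features', ['interaction', 'with', 'and', 'ratio']),
--     ]
--
--     def classify(feature):
--         lowered = feature.lower()
--         for name, keywords in rules:
--             if any(k in lowered for k in keywords):
--                 return name
--         return 'original_features'
--
--     names = [name for name, _ in rules] + ['original_features']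
--     return {n: [f for f in feature_aucs if classify(f) == n] for n in names}
-- ===== Notes on version B (the rewrite author's own statement) =====
-- stated objective: idiomatic
-- what changed: Replaces the fixed seven-branch elif cascade that appends into a mutable dict with an ordered rule table plus a classify helper, building each group in one pass per group via a dict/list comprehension (group-major instead of feature-major).
import Mathlib
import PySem

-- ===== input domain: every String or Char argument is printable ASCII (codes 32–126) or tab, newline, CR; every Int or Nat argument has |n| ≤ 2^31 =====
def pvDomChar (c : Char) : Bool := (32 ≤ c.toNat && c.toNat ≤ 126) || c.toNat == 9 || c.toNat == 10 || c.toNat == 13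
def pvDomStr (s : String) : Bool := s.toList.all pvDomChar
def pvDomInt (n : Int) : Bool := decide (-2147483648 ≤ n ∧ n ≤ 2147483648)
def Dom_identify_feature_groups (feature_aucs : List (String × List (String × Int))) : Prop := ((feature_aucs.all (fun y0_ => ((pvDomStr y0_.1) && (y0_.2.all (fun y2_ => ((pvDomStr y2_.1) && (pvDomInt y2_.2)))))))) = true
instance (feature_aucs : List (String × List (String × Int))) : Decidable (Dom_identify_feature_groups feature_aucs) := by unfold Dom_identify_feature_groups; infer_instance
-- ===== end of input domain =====

-- B iterates a rule table group-major (classify + one comprehension per group) instead of A's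
-- feature-major elif cascade appending into a mutable dict; same output, idiomatic restructuring.

-- ===== PORT A =====
-- A's `groups` dict has a fixed key set; ported as a record with one field per key,
-- assembled back into the items list (insertion order) at the end.
structure AGroups where
  time : List String
  temp : List String
  fridge : List String
  motion : List String
  dw : List String
  cross : List String
  orig : List String
deriving Repr, DecidableEq

-- one iteration of A's for-loop: the if/elif cascade, branches in A's order
def aStep (g : AGroups) (feature : String) : AGroups :=
  if ["hour", "day", "month", "weekend", "night", "business", "peak"].any
      (fun x => PySem.Str.isIn x (PySem.Str.lower feature)) then
    { g with time := g.time ++ [feature] }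
  else if PySem.Str.isIn "temp" (PySem.Str.lower feature) then
    { g with temp := g.temp ++ [feature] }
  else if PySem.Str.isIn "fridge" (PySem.Str.lower feature) then
    { g with fridge := g.fridge ++ [feature] }
  else if PySem.Str.isIn "motion" (PySem.Str.lower feature) then
    { g with motion := g.motion ++ [feature] }
  else if ["door", "window"].any (fun x => PySem.Str.isIn x (PySem.Str.lower feature)) then
    { g with dw := g.dw ++ [feature] }
  else if ["interaction", "with", "and", "ratio"].any
      (fun x => PySem.Str.isIn x (PySem.Str.lower feature)) then
    { g with cross := g.cross ++ [feature] }
  else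
    { g with orig := g.orig ++ [feature] }

def identify_feature_groups (feature_aucs : List (String × List (String × Int))) : List (String × List String) :=
  let g := feature_aucs.foldl (fun g p => aStep g p.1) ⟨[], [], [], [], [], [], []⟩
  [("time_features", g.time), ("temperature_features", g.temp), ("fridge_features", g.fridge),
   ("motion_features", g.motion), ("door_window_features", g.dw),
   ("cross_sensor_features", g.cross), ("original_features", g.orig)]

-- ===== PORT B =====
def bRules : List (String × List String) :=
  [("time_features", ["hour", "day", "month", "weekend", "night", "business", "peak"]),
   ("temperature_features", ["temp"]),
   ("fridge_features", ["fridge"]),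
   ("motion_features", ["motion"]),
   ("door_window_features", ["door", "window"]),
   ("cross_sensor_features", ["interaction", "with", "and", "ratio"])]

def bClassify (feature : String) : String :=
  let lowered := PySem.Str.lower feature
  match bRules.find? (fun r => r.2.any (fun k => PySem.Str.isIn k lowered)) with
  | some r => r.1
  | none => "original_features"

def identify_feature_groups_alt (feature_aucs : List (String × List (String × Int))) : List (String × List String) :=
  (bRules.map (·.1) ++ ["original_features"]).map
    (fun n => (n, (feature_aucs.map (·.1)).filter (fun f => bClassify f == n)))

-- ===== PRECONDITION & SPEC =====
def Spec_identify_feature_groups (feature_aucs : List (String × List (String × Int))) (out : List (String × List String)) : Prop := out = identify_feature_groups_alt feature_aucs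
instance (feature_aucs : List (String × List (String × Int))) (out : List (String × List String)) : Decidable (Spec_identify_feature_groups feature_aucs out) := by unfold Spec_identify_feature_groups; infer_instance

-- ===== CLAIM (what is proved, stated in full; the proofs are below) =====
def Claim_equal_identify_feature_groups : Prop := ∀ (feature_aucs : List (String × List (String × Int))), Dom_identify_feature_groups feature_aucs → Spec_identify_feature_groups feature_aucs (identify_feature_groups feature_aucs)

-- ===== LEMMAS AND PROOFS =====

-- the loop invariant: folding A's step over `fs` extends each accumulator field by the
-- features B classifies into that group
theorem aLoop_filter (fs : List String) (g : AGroups) :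
    fs.foldl aStep g =
      ⟨g.time ++ fs.filter (fun f => bClassify f == "time_features"),
       g.temp ++ fs.filter (fun f => bClassify f == "temperature_features"),
       g.fridge ++ fs.filter (fun f => bClassify f == "fridge_features"),
       g.motion ++ fs.filter (fun f => bClassify f == "motion_features"),
       g.dw ++ fs.filter (fun f => bClassify f == "door_window_features"),
       g.cross ++ fs.filter (fun f => bClassify f == "cross_sensor_features"),
       g.orig ++ fs.filter (fun f => bClassify f == "original_features")⟩ := by
  induction fs generalizing g with
  | nil => simp
  | cons f rest ih =>
    cases h1 : ((PySem.Str.isIn "hour" (PySem.Str.lower f) || (PySem.Str.isIn "day" (PySem.Str.lower f) || (PySem.Str.isIn "month" (PySem.Str.lower f) || (PySem.Str.isIn "weekend" (PySem.Str.lower f) || (PySem.Str.isIn "night" (PySem.Str.lower f) || (PySem.Str.isIn "business" (PySem.Str.lower f) || PySem.Str.isIn "peak" (PySem.Str.lower f)))))))) with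
    | true =>
      have hc : bClassify f = "time_features" := by
        simp only [bClassify, bRules, List.find?, List.any_cons, List.any_nil, Bool.or_false, h1]
      have hs : aStep g f = { g with time := g.time ++ [f] } := by
        simp only [aStep, List.any_cons, List.any_nil, Bool.or_false, h1]
        try simp
      simp only [List.foldl_cons, List.filter_cons, hs, ih, hc]
      simp
    | false =>
      cases h2 : (PySem.Str.isIn "temp" (PySem.Str.lower f)) with
      | true =>
        have hc : bClassify f = "temperature_features" := by
          simp only [bClassify, bRules, List.find?, List.any_cons, List.any_nil, Bool.or_false, h1, h2]
        have hs : aStep g f = { g with temp := g.temp ++ [f] } := by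
          simp only [aStep, List.any_cons, List.any_nil, Bool.or_false, h1, h2]
          try simp
        simp only [List.foldl_cons, List.filter_cons, hs, ih, hc]
        simp
      | false =>
        cases h3 : (PySem.Str.isIn "fridge" (PySem.Str.lower f)) with
        | true =>
          have hc : bClassify f = "fridge_features" := by
            simp only [bClassify, bRules, List.find?, List.any_cons, List.any_nil, Bool.or_false, h1, h2, h3]
          have hs : aStep g f = { g with fridge := g.fridge ++ [f] } := by
            simp only [aStep, List.any_cons, List.any_nil, Bool.or_false, h1, h2, h3]
            try simp
          simp only [List.foldl_cons, List.filter_cons, hs, ih, hc]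
          simp
        | false =>
          cases h4 : (PySem.Str.isIn "motion" (PySem.Str.lower f)) with
          | true =>
            have hc : bClassify f = "motion_features" := by
              simp only [bClassify, bRules, List.find?, List.any_cons, List.any_nil, Bool.or_false, h1, h2, h3, h4]
            have hs : aStep g f = { g with motion := g.motion ++ [f] } := by
              simp only [aStep, List.any_cons, List.any_nil, Bool.or_false, h1, h2, h3, h4]
              try simp
            simp only [List.foldl_cons, List.filter_cons, hs, ih, hc]
            simp
          | false =>
            cases h5 : ((PySem.Str.isIn "door" (PySem.Str.lower f) || PySem.Str.isIn "window" (PySem.Str.lower f))) with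
            | true =>
              have hc : bClassify f = "door_window_features" := by
                simp only [bClassify, bRules, List.find?, List.any_cons, List.any_nil, Bool.or_false, h1, h2, h3, h4, h5]
              have hs : aStep g f = { g with dw := g.dw ++ [f] } := by
                simp only [aStep, List.any_cons, List.any_nil, Bool.or_false, h1, h2, h3, h4, h5]
                try simp
              simp only [List.foldl_cons, List.filter_cons, hs, ih, hc]
              simp
            | false =>
              cases h6 : ((PySem.Str.isIn "interaction" (PySem.Str.lower f) || (PySem.Str.isIn "with" (PySem.Str.lower f) || (PySem.Str.isIn "and" (PySem.Str.lower f) || PySem.Str.isIn "ratio" (PySem.Str.lower f))))) with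
              | true =>
                have hc : bClassify f = "cross_sensor_features" := by
                  simp only [bClassify, bRules, List.find?, List.any_cons, List.any_nil, Bool.or_false, h1, h2, h3, h4, h5, h6]
                have hs : aStep g f = { g with cross := g.cross ++ [f] } := by
                  simp only [aStep, List.any_cons, List.any_nil, Bool.or_false, h1, h2, h3, h4, h5, h6]
                  try simp
                simp only [List.foldl_cons, List.filter_cons, hs, ih, hc]
                simp
              | false =>
                have hc : bClassify f = "original_features" := by
                  simp only [bClassify, bRules, List.find?, List.any_cons, List.any_nil, Bool.or_false, h1, h2, h3, h4, h5, h6]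
                have hs : aStep g f = { g with orig := g.orig ++ [f] } := by
                  simp only [aStep, List.any_cons, List.any_nil, Bool.or_false, h1, h2, h3, h4, h5, h6]
                  try simp
                simp only [List.foldl_cons, List.filter_cons, hs, ih, hc]
                simp

-- ===== VERDICT (by name: the statement is the Claim_ definition above) =====
theorem identify_feature_groups_spec : Claim_equal_identify_feature_groups := by
  intro fs _
  unfold Spec_identify_feature_groups identify_feature_groups identify_feature_groups_alt
  have h : fs.foldl (fun g p => aStep g p.1) ⟨[], [], [], [], [], [], []⟩ =
      (fs.map (·.1)).foldl aStep ⟨[], [], [], [], [], [], []⟩ := by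
    rw [List.foldl_map]
  rw [h, aLoop_filter]
  simp [bRules]
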